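-- pv_equiv track=rewrite | github.com/WikidPad/WikidPad | WikidPad/extensions/HtmlExporter.py | _escapeAnchor
-- ===== SOURCE A (Python) =====
-- def _escapeAnchor(name):
--     """
--     Escape name to be usable as HTML anchor (URL fragment)
--     """
--     result = []
--     for c in name:
--         oc = ord(c)
--         if oc < 48 or (57 < oc < 65) or (90 < oc < 97) or oc > 122:
--             if oc > 255:
--                 result.append("$%04x" % oc)
--             else:
--                 result.append("=%02x" % oc)
--         else:
--             result.append(c)
--     return "".join(result)
-- ===== SOURCE B (Python) =====
-- class _AnchorTable(dict):
--     """Lazy translation table for str.translate: maps each code point to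
--     itself if [0-9A-Za-z], else to its escaped form, caching on first use."""
--     def __missing__(self, oc):
--         if 48 <= oc <= 57 or 65 <= oc <= 90 or 97 <= oc <= 122:
--             r = chr(oc)
--         elif oc > 255:
--             r = '$%04x' % oc
--         else:
--             r = '=%02x' % oc
--         self[oc] = r
--         return r
--
-- _anchorTable = _AnchorTable()
--
-- def _escapeAnchor(name):
--     """
--     Escape name to be usable as HTML anchor (URL fragment)
--     """
--     return name.translate(_anchorTable)
-- ===== Notes on version B (the rewrite author's own statement) =====
-- stated objective: idiomatic
-- what changed: Replaced the explicit per-character loop that appends to a result list and joins it by a single str.translate call driven by a lazily self-filling translation table (dict with __missing__).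
import Mathlib
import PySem

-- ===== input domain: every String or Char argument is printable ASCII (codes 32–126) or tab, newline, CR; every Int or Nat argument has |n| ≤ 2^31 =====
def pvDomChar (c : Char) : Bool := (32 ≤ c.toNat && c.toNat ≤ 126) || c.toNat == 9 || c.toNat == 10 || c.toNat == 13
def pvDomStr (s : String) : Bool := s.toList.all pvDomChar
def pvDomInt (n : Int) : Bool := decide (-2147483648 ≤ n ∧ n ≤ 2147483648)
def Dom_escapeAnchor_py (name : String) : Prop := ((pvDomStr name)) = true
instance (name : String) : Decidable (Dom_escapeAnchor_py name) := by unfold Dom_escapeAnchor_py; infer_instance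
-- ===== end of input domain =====

-- B replaces A's append-to-list-and-join loop by a translate-style per-character table lookup (idiomatic; same cost).

-- shared low-level formatting: Python's '%0wx' on a nonnegative integer (lowercase hex, zero-padded to width w); exact for n ≥ 0
def pvHexDigit (n : Nat) : Char := if n < 10 then Char.ofNat (48 + n) else Char.ofNat (87 + n)

def pvHex (n : Nat) : List Char :=
  if _h : n < 16 then [pvHexDigit n]
  else pvHex (n / 16) ++ [pvHexDigit (n % 16)]
decreasing_by exact Nat.div_lt_self (by omega) (by omega)

def pvHexPad (w n : Nat) : List Char :=
  List.replicate (w - (pvHex n).length) '0' ++ pvHex n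

-- ===== PORT A =====
-- one iteration of A's loop: the string appended to `result` for character c
def escA_piece (c : Char) : String :=
  let oc := c.toNat
  if oc < 48 ∨ (57 < oc ∧ oc < 65) ∨ (90 < oc ∧ oc < 97) ∨ oc > 122 then
    if oc > 255 then "$" ++ String.ofList (pvHexPad 4 oc)
    else "=" ++ String.ofList (pvHexPad 2 oc)
  else String.ofList [c]

def escapeAnchor_py (name : String) : String :=
  String.join (name.toList.foldl (fun r c => r ++ [escA_piece c]) [])

-- ===== PORT B =====
-- the translation table's entry for code point oc (Source B: _AnchorTable.__missing__)
def anchorEntry (oc : Nat) : List Char :=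
  if (48 ≤ oc ∧ oc ≤ 57) ∨ (65 ≤ oc ∧ oc ≤ 90) ∨ (97 ≤ oc ∧ oc ≤ 122) then [Char.ofNat oc]
  else if oc > 255 then '$' :: pvHexPad 4 oc
  else '=' :: pvHexPad 2 oc

-- str.translate: map every character through the table and concatenate
def escapeAnchor_py_alt (name : String) : String :=
  String.ofList (name.toList.flatMap (fun c => anchorEntry c.toNat))

-- ===== PRECONDITION & SPEC =====
def Spec_escapeAnchor_py (name : String) (out : String) : Prop := out = escapeAnchor_py_alt name
instance (name : String) (out : String) : Decidable (Spec_escapeAnchor_py name out) := by unfold Spec_escapeAnchor_py; infer_instance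

-- ===== CLAIM (what is proved, stated in full; the proofs are below) =====
def Claim_equal_escapeAnchor_py : Prop := ∀ (name : String), Dom_escapeAnchor_py name → Spec_escapeAnchor_py name (escapeAnchor_py name)

-- ===== LEMMAS AND PROOFS =====

theorem escA_piece_eq (c : Char) : escA_piece c = String.ofList (anchorEntry c.toNat) := by
  unfold escA_piece anchorEntry
  have hv := c.toNat
  by_cases h : (48 ≤ c.toNat ∧ c.toNat ≤ 57) ∨ (65 ≤ c.toNat ∧ c.toNat ≤ 90) ∨ (97 ≤ c.toNat ∧ c.toNat ≤ 122)
  · have h' : ¬ (c.toNat < 48 ∨ (57 < c.toNat ∧ c.toNat < 65) ∨ (90 < c.toNat ∧ c.toNat < 97) ∨ c.toNat > 122) := by omega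
    simp [h, h', Char.ofNat_toNat]
  · have h' : c.toNat < 48 ∨ (57 < c.toNat ∧ c.toNat < 65) ∨ (90 < c.toNat ∧ c.toNat < 97) ∨ c.toNat > 122 := by omega
    by_cases hb : c.toNat > 255 <;> simp [h, h', hb] <;> (apply String.ext; simp)

theorem join_snoc (l : List String) (x : String) :
    String.join (l ++ [x]) = String.join l ++ x := by
  induction l with
  | nil => simp [String.join]
  | cons a l ih => simp [String.join]

theorem join_foldl (l : List Char) (acc : List String) :
    String.join (l.foldl (fun r c => r ++ [escA_piece c]) acc)
      = String.join acc ++ String.ofList (l.flatMap (fun c => anchorEntry c.toNat)) := by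
  induction l generalizing acc with
  | nil =>
    apply String.ext; simp
  | cons c l ih =>
    simp only [List.foldl_cons, ih, List.flatMap_cons]
    rw [join_snoc, escA_piece_eq]
    apply String.ext
    simp

-- ===== VERDICT (by name: the statement is the Claim_ definition above) =====
theorem escapeAnchor_py_spec : Claim_equal_escapeAnchor_py := by
  intro name _
  unfold Spec_escapeAnchor_py escapeAnchor_py escapeAnchor_py_alt
  rw [join_foldl]
  simp [String.join]
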